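-- pv_equiv track=rewrite | github.com/kfpanda/spark | spark-stat/src/stat-pass.py | type_map
-- ===== SOURCE A (Python) =====
-- def type_map(file_tuple):
-- 	lines = file_tuple[1].split("\n");
-- 	auth_count = 0;
-- 	login_count = 0;
-- 	for line in lines :
-- 		elems = line.split("|");
-- 		if( len(elems) > 3 and elems[3] == "auth" ):
-- 			auth_count += 1;
-- 		elif( len(elems) > 3 and elems[3] == "login"):
-- 			login_count += 1;
-- 	return [("auth", auth_count), ("login", login_count)];
-- ===== SOURCE B (Python) =====
-- def type_map(file_tuple):
--     auth_count = 0
--     login_count = 0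
--     pipes = 0
--     field = ""
--     for ch in file_tuple[1] + "\n":
--         if ch == "\n":
--             if pipes >= 3:
--                 if field == "auth":
--                     auth_count += 1
--                 elif field == "login":
--                     login_count += 1
--             pipes = 0
--             field = ""
--         elif ch == "|":
--             pipes += 1
--         elif pipes == 3:
--             field += ch
--     return [("auth", auth_count), ("login", login_count)]
-- ===== Notes on version B (the rewrite author's own statement) =====
-- stated objective: alternative
-- what changed: B replaces A's split-on-newline / split-each-line-on-pipe counting loop by a single character-level state machine that scans the text once, counting pipes and buffering only the 4th field of the current line, classifying a line at each newline; no intermediate line or field lists are built.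
import Mathlib
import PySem

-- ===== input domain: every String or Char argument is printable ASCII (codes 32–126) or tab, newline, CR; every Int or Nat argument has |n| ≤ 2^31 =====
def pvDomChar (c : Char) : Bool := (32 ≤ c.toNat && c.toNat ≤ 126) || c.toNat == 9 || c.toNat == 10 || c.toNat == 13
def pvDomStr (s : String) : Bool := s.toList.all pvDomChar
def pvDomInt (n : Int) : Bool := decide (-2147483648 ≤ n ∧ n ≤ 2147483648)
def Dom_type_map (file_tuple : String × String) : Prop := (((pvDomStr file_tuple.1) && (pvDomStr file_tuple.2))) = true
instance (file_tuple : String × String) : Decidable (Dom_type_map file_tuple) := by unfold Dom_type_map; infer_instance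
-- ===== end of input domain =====

-- B replaces A's split-then-count loops by a one-pass character-level state machine; objective: alternative.

-- ===== PORT A =====
def type_map (file_tuple : String × String) : List (String × Int) :=
  -- sep "\n" is a nonempty literal, so split? is always some; getD [] is exact
  let lines := ((PySem.Str.split? file_tuple.2 "\n").getD [])
  let acc := lines.foldl (fun (acc : Int × Int) line =>
    let elems := ((PySem.Str.split? line "|").getD [])
    if elems.length > 3 && (PySem.List.pyGetD elems 3 "" == "auth") then
      (acc.1 + 1, acc.2)
    else if elems.length > 3 && (PySem.List.pyGetD elems 3 "" == "login") then
      (acc.1, acc.2 + 1)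
    else acc) (0, 0)
  [("auth", acc.1), ("login", acc.2)]

-- ===== PORT B =====
-- one transition of Source B's character state machine: state = (auth_count, login_count, pipes, field);
-- Python's `field` string (built by `+=`) is ported as the List Char of its characters
def tmStep : (Int × Int × Int × List Char) → Char → (Int × Int × Int × List Char)
  | (a, l, p, f), c =>
    if c = '\n' then
      if 3 ≤ p then
        if f = ['a', 'u', 't', 'h'] then (a + 1, l, 0, [])
        else if f = ['l', 'o', 'g', 'i', 'n'] then (a, l + 1, 0, [])
        else (a, l, 0, [])
      else (a, l, 0, [])
    else if c = '|' then (a, l, p + 1, f)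
    else if p = 3 then (a, l, p, f ++ [c])
    else (a, l, p, f)

def type_map_alt (file_tuple : String × String) : List (String × Int) :=
  -- Source B iterates over the characters of file_tuple[1] + "\n"
  let st := (file_tuple.2.toList ++ ['\n']).foldl tmStep (0, 0, 0, [])
  [("auth", st.1), ("login", st.2.1)]

-- ===== PRECONDITION & SPEC =====
def Spec_type_map (file_tuple : String × String) (out : List (String × Int)) : Prop := out = type_map_alt file_tuple
instance (file_tuple : String × String) (out : List (String × Int)) : Decidable (Spec_type_map file_tuple out) := by unfold Spec_type_map; infer_instance

-- ===== CLAIM =====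
def Claim_equal_type_map : Prop := ∀ (file_tuple : String × String), Dom_type_map file_tuple → Spec_type_map file_tuple (type_map file_tuple)

-- ===== LEMMAS AND PROOFS =====
def pvMySplit (s : Char) : List Char → List Char → List (List Char)
  | [], cur => [cur.reverse]
  | c :: r, cur => if c = s then cur.reverse :: pvMySplit s r [] else pvMySplit s r (c :: cur)


theorem pv_go' (s : Char) (l : List Char) : ∀ (fuel : Nat) (cur : List Char) (acc : List (List Char)),
    l.length < fuel → PySem.Chars.splitOn.go [s] fuel l cur acc = acc.reverse ++ pvMySplit s l cur := by
  induction l with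
  | nil =>
    intro fuel cur acc h
    cases fuel with
    | zero => omega
    | succ f =>
      simp [PySem.Chars.splitOn.go, pvMySplit]
  | cons c r ih =>
    intro fuel cur acc h
    cases fuel with
    | zero => simp at h
    | succ f =>
      rw [PySem.Chars.splitOn.go]
      by_cases hc : c = s
      · subst hc
        simp [List.isPrefixOf, pvMySplit, ih _ _ _ (by simpa using h)]
      · simp [List.isPrefixOf, hc, Ne.symm hc, pvMySplit, ih _ _ _ (by simpa using h)]

theorem pv_splitOn (s : Char) (l : List Char) : PySem.Chars.splitOn l [s] = pvMySplit s l [] := by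
  rw [PySem.Chars.splitOn, pv_go' s l _ _ _ (by omega)]; rfl

theorem pv_shift (s : Char) : ∀ (l cur : List Char),
    pvMySplit s l cur = (cur.reverse ++ (pvMySplit s l []).headD []) :: (pvMySplit s l []).tail := by
  intro l; induction l with
  | nil => intro cur; simp [pvMySplit]
  | cons c r ih =>
    intro cur
    by_cases hc : c = s
    · simp [pvMySplit, hc]
    · simp only [pvMySplit, if_neg hc]
      rw [ih (c :: cur), ih [c]]
      simp

theorem pv_len (s : Char) : ∀ (l cur : List Char), (pvMySplit s l cur).length = l.count s + 1 := by
  intro l; induction l with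
  | nil => intro cur; simp [pvMySplit]
  | cons c r ih =>
    intro cur
    by_cases hc : c = s
    · simp [pvMySplit, hc, List.count_cons, ih]
    · simp [pvMySplit, hc, List.count_cons, Ne.symm hc, ih]

theorem pv_head : ∀ (l : List Char), (pvMySplit '|' l []).headD [] = l.takeWhile (· ≠ '|') := by
  intro l; induction l with
  | nil => simp [pvMySplit]
  | cons c r ih =>
    by_cases hc : c = '|'
    · simp [pvMySplit, hc, List.takeWhile]
    · rw [pvMySplit, if_neg hc, pv_shift]
      simp only [List.headD_eq_head?_getD] at ih
      simp [List.takeWhile, hc, ih]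

def pvFieldFrom : Nat → List Char → List Char
  | 0, r => r.takeWhile (· ≠ '|')
  | _ + 1, [] => []
  | k + 1, c :: r => if c = '|' then pvFieldFrom k r else pvFieldFrom (k + 1) r

theorem pv_getD : ∀ (l : List Char) (j : Nat), 1 ≤ j → j ≤ l.count '|' →
    (pvMySplit '|' l []).getD j [] = pvFieldFrom j l := by
  intro l; induction l with
  | nil => intro j h1 h2; simp at h2; omega
  | cons c r ih =>
    intro j h1 h2
    by_cases hc : c = '|'
    · subst hc
      rw [pvMySplit, if_pos rfl]
      cases j with
      | zero => omega
      | succ k =>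
        rw [List.getD_cons_succ]
        cases k with
        | zero =>
          rw [pv_shift '|' r []]
          simp only [List.reverse_nil, List.nil_append, List.getD_cons_zero]
          rw [pv_head r]
          simp [pvFieldFrom]
        | succ m =>
          rw [ih (m + 1) (by omega) (by simp [List.count_cons] at h2; omega)]
          simp [pvFieldFrom]
    · rw [pvMySplit, if_neg hc, pv_shift]
      have hcnt : j ≤ r.count '|' := by simp [List.count_cons, hc] at h2; omega
      cases j with
      | zero => omega
      | succ k =>
        rw [List.getD_cons_succ]
        have := ih (k + 1) h1 hcnt
        rw [pv_shift '|' r []] at this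
        rw [List.getD_cons_succ] at this
        rw [this]
        simp [pvFieldFrom, hc]

def pvScan : (Int × List Char) → List Char → (Int × List Char)
  | pf, [] => pf
  | (p, f), c :: r =>
    if c = '|' then pvScan (p + 1, f) r
    else if p = 3 then pvScan (p, f ++ [c]) r
    else pvScan (p, f) r

theorem pv_scan : ∀ (l : List Char) (p : Int) (f : List Char), 0 ≤ p → (p < 3 → f = []) →
    pvScan (p, f) l = (p + l.count '|',
      if 3 < p then f else if p = 3 then f ++ l.takeWhile (· ≠ '|') else pvFieldFrom (3 - p).toNat l) := by
  intro l
  induction l with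
  | nil =>
    intro p f h0 hf
    rcases lt_trichotomy p 3 with h | h | h
    · have hk : (3 - p).toNat = ((3 - p).toNat - 1) + 1 := by omega
      rw [hk]
      simp [pvScan, hf h, pvFieldFrom, (by omega : ¬ 3 < p), (by omega : p ≠ 3)]
    · simp [pvScan, h]
    · simp [pvScan, h, (by omega : p ≠ 3)]
  | cons c r ih =>
    intro p f h0 hf
    by_cases hc : c = '|'
    · subst hc
      rw [pvScan, if_pos rfl, ih (p + 1) f (by omega) (fun h => hf (by omega))]
      have hcnt : (('|' :: r).count '|' : Int) = (r.count '|' : Int) + 1 := by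
        simp [List.count_cons]
      rcases lt_trichotomy (p + 1) 3 with h1 | h1 | h1
      · -- p + 1 < 3, so p < 3
        rw [if_neg (by omega), if_neg (by omega), if_neg (by omega), if_neg (by omega)]
        refine Prod.ext (by simp [List.count_cons]; try ring) ?_
        have hk : (3 - p).toNat = (3 - (p + 1)).toNat + 1 := by omega
        simp [hk, pvFieldFrom]
      · -- p + 1 = 3
        rw [if_neg (by omega), if_pos h1, if_neg (by omega), if_neg (by omega)]
        refine Prod.ext (by simp [List.count_cons]; try ring) ?_
        have hk : (3 - p).toNat = 1 := by omega
        rw [hf (by omega), hk]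
        simp [pvFieldFrom]
      · -- 3 < p + 1 : either p = 3 or 3 < p
        rw [if_pos h1]
        rcases eq_or_lt_of_le (by omega : (3:Int) ≤ p) with h3 | h3
        · rw [if_neg (by omega), if_pos h3.symm]
          refine Prod.ext (by simp [List.count_cons]; try ring) ?_
          simp [List.takeWhile]
        · rw [if_pos h3]
          exact Prod.ext (by simp [List.count_cons]; try ring) rfl
    · rw [pvScan, if_neg hc]
      rcases lt_trichotomy p 3 with h | h | h
      · rw [if_neg (by omega), ih p f h0 hf]
        rw [if_neg (by omega), if_neg (by omega), if_neg (by omega), if_neg (by omega)]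
        refine Prod.ext (by simp [List.count_cons, hc]; try ring) ?_
        have hk : (3 - p).toNat = ((3 - p).toNat - 1) + 1 := by omega
        rw [hk]
        simp only [pvFieldFrom, if_neg hc, ← hk]
      · rw [if_pos h, ih p (f ++ [c]) h0 (by omega)]
        rw [if_neg (by omega), if_pos h, if_neg (by omega), if_pos h]
        refine Prod.ext (by simp [List.count_cons, hc]; try ring) ?_
        simp [List.takeWhile, hc]
      · rw [if_neg (by omega), ih p f h0 hf]
        rw [if_pos h, if_pos h]
        exact Prod.ext (by simp [List.count_cons, hc]; try ring) rfl


def pvJoinNL : List (List Char) → List Char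
  | [] => []
  | x :: xs => x ++ '\n' :: pvJoinNL xs

def pvLineStep (al : Int × Int) (line : List Char) : Int × Int :=
  let s := pvScan (0, []) line
  if 3 ≤ s.1 then
    if s.2 = ['a', 'u', 't', 'h'] then (al.1 + 1, al.2)
    else if s.2 = ['l', 'o', 'g', 'i', 'n'] then (al.1, al.2 + 1)
    else al
  else al

theorem pv_join : ∀ (cs cur : List Char), pvJoinNL (pvMySplit '\n' cs cur) = cur.reverse ++ cs ++ ['\n'] := by
  intro cs
  induction cs with
  | nil => intro cur; simp [pvMySplit, pvJoinNL]
  | cons c r ih =>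
    intro cur
    by_cases hc : c = '\n'
    · subst hc; simp [pvMySplit, pvJoinNL, ih]
    · simp [pvMySplit, hc, pvJoinNL, ih (c :: cur)]

theorem pv_nonl : ∀ (cs cur : List Char), '\n' ∉ cur → ∀ li ∈ pvMySplit '\n' cs cur, '\n' ∉ li := by
  intro cs
  induction cs with
  | nil => intro cur h li hli; simp [pvMySplit] at hli; simp [hli, h]
  | cons c r ih =>
    intro cur h li hli
    by_cases hc : c = '\n'
    · subst hc
      simp [pvMySplit] at hli
      rcases hli with h1 | h1
      · simp [h1, h]
      · exact ih [] (by simp) li h1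
    · rw [pvMySplit, if_neg hc] at hli
      exact ih (c :: cur) (by simp [h, Ne.symm hc]) li hli

-- over a newline-free line, tmStep only updates the (pipes, field) state, as pvScan does
theorem pv_lineFold : ∀ (line : List Char), '\n' ∉ line → ∀ (a l p : Int) (f : List Char),
    List.foldl tmStep (a, l, p, f) line = (a, l, pvScan (p, f) line) := by
  intro line
  induction line with
  | nil => intro _ a l p f; simp [pvScan]
  | cons c r ih =>
    intro h a l p f
    have hc : c ≠ '\n' := fun hcc => h (by simp [hcc])
    have hr : '\n' ∉ r := fun hrr => h (by simp [hrr])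
    by_cases hp : c = '|'
    · simp only [List.foldl_cons, tmStep, if_neg hc, if_pos hp, pvScan, ih hr]
    · by_cases h3 : p = 3
      · subst h3
        simp [List.foldl_cons, tmStep, hc, hp, pvScan, ih hr]
      · simp only [List.foldl_cons, tmStep, if_neg hc, if_neg hp, if_neg h3, pvScan, ih hr]

theorem pv_mainFold : ∀ (lines : List (List Char)), (∀ li ∈ lines, '\n' ∉ li) → ∀ (a l : Int),
    List.foldl tmStep (a, l, 0, []) (pvJoinNL lines) = (((List.foldl pvLineStep (a, l) lines).1 : Int), ((List.foldl pvLineStep (a, l) lines).2 : Int), (0 : Int), ([] : List Char)) := by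
  intro lines
  induction lines with
  | nil => intro _ a l; simp [pvJoinNL]
  | cons x xs ih =>
    intro h a l
    rw [pvJoinNL, ← List.singleton_append, List.foldl_append,
      pv_lineFold x (h x (by simp)) a l 0 [], List.foldl_append]
    simp only [List.foldl_cons, List.foldl_nil]
    have hstep : tmStep (a, l, pvScan (0, []) x) '\n' = ((pvLineStep (a, l) x).1, (pvLineStep (a, l) x).2, (0 : Int), ([] : List Char)) := by
      rcases hs : pvScan (0, []) x with ⟨p, f⟩
      simp only [tmStep, pvLineStep, hs, if_pos rfl]
      split_ifs <;> rfl
    rw [hstep, ih (fun li hli => h li (by simp [hli])) _ _]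

theorem pv_split_str (s : String) (c : Char) (cs : String) (h : cs.toList = [c]) :
    ((PySem.Str.split? s cs).getD []) = List.map String.ofList (pvMySplit c s.toList []) := by
  simp [PySem.Str.split?, PySem.Chars.split?, h, pv_splitOn]

theorem pv_perline (lc : List Char) (acc : Int × Int) :
    (let elems := ((PySem.Str.split? (String.ofList lc) "|").getD [])
     if elems.length > 3 && (PySem.List.pyGetD elems 3 "" == "auth") then
       (acc.1 + 1, acc.2)
     else if elems.length > 3 && (PySem.List.pyGetD elems 3 "" == "login") then
       (acc.1, acc.2 + 1)
     else acc) = pvLineStep acc lc := by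
  rw [pv_split_str _ '|' "|" (by decide)]
  rw [String.toList_ofList]
  rw [pvLineStep]
  rw [pv_scan lc 0 [] (by omega) (fun _ => rfl)]
  simp only [List.length_map, pv_len, List.nil_append]
  by_cases hcnt : 3 ≤ lc.count '|'
  · have hlen : lc.count '|' + 1 > 3 := by omega
    have hget : PySem.List.pyGetD (List.map String.ofList (pvMySplit '|' lc [])) 3 "" =
        String.ofList (pvFieldFrom 3 lc) := by
      rw [PySem.List.pyGetD_ofNat']
      rw [show ("" : String) = String.ofList [] from rfl, List.getD_map, pv_getD lc 3 (by omega) hcnt]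
    rw [hget]
    simp only [zero_add, if_neg (by omega : ¬ (3:Int) < 0), if_neg (by omega : (0:Int) ≠ 3)]
    have h3 : ((3:Int) ≤ (lc.count '|' : Int)) := by exact_mod_cast hcnt
    rw [if_pos h3]
    simp only [decide_eq_true_eq, gt_iff_lt, hlen, decide_true, Bool.true_and]
    have e1 : (String.ofList (pvFieldFrom 3 lc) = "auth") ↔ pvFieldFrom 3 lc = ['a','u','t','h'] := by
      rw [show ("auth" : String) = String.ofList ['a','u','t','h'] from rfl, String.ofList_inj]
    have e2 : (String.ofList (pvFieldFrom 3 lc) = "login") ↔ pvFieldFrom 3 lc = ['l','o','g','i','n'] := by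
      rw [show ("login" : String) = String.ofList ['l','o','g','i','n'] from rfl, String.ofList_inj]
    split_ifs with h1 h2 h3' h4 <;> first | rfl | (exfalso; simp_all)
  · have hlen : ¬ (lc.count '|' + 1 > 3) := by omega
    have h3 : ¬ ((3:Int) ≤ 0 + (lc.count '|' : Int)) := by
      simp; exact_mod_cast (by omega : (lc.count '|' : Int) < 3)
    rw [if_neg h3]
    simp [hlen]

-- ===== VERDICT =====
theorem type_map_spec : Claim_equal_type_map := by
  intro ft _
  unfold Spec_type_map type_map type_map_alt
  simp only []
  have hB : (ft.2.toList ++ ['\n']) = pvJoinNL (pvMySplit '\n' ft.2.toList []) := by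
    rw [pv_join]; simp
  rw [hB, pv_mainFold _ (pv_nonl _ [] (by simp)) 0 0]
  rw [pv_split_str ft.2 '\n' "\n" (by decide), List.foldl_map]
  have hfun : (fun (acc : Int × Int) lc =>
      let elems := ((PySem.Str.split? (String.ofList lc) "|").getD [])
      if elems.length > 3 && (PySem.List.pyGetD elems 3 "" == "auth") then
        (acc.1 + 1, acc.2)
      else if elems.length > 3 && (PySem.List.pyGetD elems 3 "" == "login") then
        (acc.1, acc.2 + 1)
      else acc) = pvLineStep := by
    funext acc lc; exact pv_perline lc acc
  rw [hfun]
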